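-- pv_equiv track=rewrite | github.com/SYSTEMATI0N/tetris_ha | tetris_ha/main.py | get_rotations
-- ===== SOURCE A (Python) =====
-- def get_rotations(blocks):
--     seen = set()
--     rotations = []
--     current = list(blocks)
--     for _ in range(4):
--         norm = tuple(sorted(current))
--         if norm in seen:
--             break
--         seen.add(norm)
--         rotations.append(list(current))
--         current = [(-c, r) for r, c in current]
--     return rotations
-- ===== SOURCE B (Python) =====
-- def _same_multiset(xs, ys):
--     # removal-based multiset equality: consume each element of ys out of a working copy of xs
--     rest = list(xs)
--     for q in ys:
--         if q in rest:
--             rest.remove(q)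
--         else:
--             return False
--     return not rest
--
--
-- def get_rotations(blocks):
--     # Compute the shape's rotational period from its symmetry subgroup of C4
--     # (so the period is 1, 2 or 4): test 180-degree symmetry first (implied by
--     # 90-degree symmetry), then 90-degree; return that many entries of the
--     # table of closed-form rotations.
--     pts = list(blocks)
--     if not _same_multiset(pts, [(-r, -c) for r, c in pts]):
--         period = 4
--     elif _same_multiset(pts, [(-c, r) for r, c in pts]):
--         period = 1
--     else:
--         period = 2
--     return [pts,
--             [(-c, r) for r, c in pts],
--             [(-r, -c) for r, c in pts],
--             [(c, -r) for r, c in pts]][:period]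
-- ===== Notes on version B (the rewrite author's own statement) =====
-- stated objective: alternative
-- what changed: Instead of iteratively rotating with a seen-set of sorted tuples and breaking on repeat, B computes the shape's rotational period (1, 2 or 4, its symmetry subgroup of C4) by a removal-based multiset-equality test against the 180- and then 90-degree closed-form rotations, and returns that many entries of a precomputed table of all four rotations.
import Mathlib
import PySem

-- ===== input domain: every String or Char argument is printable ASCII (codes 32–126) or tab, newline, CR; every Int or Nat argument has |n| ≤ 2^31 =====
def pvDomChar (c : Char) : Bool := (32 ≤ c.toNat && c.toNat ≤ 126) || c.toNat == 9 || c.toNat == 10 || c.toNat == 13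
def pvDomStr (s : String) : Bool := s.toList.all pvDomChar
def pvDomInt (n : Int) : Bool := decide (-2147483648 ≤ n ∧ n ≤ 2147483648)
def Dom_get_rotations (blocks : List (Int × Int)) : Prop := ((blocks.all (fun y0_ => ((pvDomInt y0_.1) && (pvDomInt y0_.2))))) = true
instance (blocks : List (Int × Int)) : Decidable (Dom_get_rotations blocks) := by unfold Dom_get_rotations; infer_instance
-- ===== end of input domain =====

-- B computes the shape's rotational period from its symmetry subgroup of C4 (removal-based
-- multiset test, no sorting/seen-set) and slices a table of closed-form rotations (alternative).

-- Python's sorted() on a list of int pairs: lexicographic tuple order = Lex (Int × Int)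
def pvSortL (xs : List (Int × Int)) : List (Int × Int) :=
  PySem.List.sorted xs (fun p => (toLex p : Lex (Int × Int)))

-- ===== PORT A =====
-- one iteration of A's 'for _ in range(4)' body; the Bool flag models 'break'
def pvRotStep (st : PySem.Set (List (Int × Int)) × List (List (Int × Int)) × List (Int × Int) × Bool)
    (_ : Int) : PySem.Set (List (Int × Int)) × List (List (Int × Int)) × List (Int × Int) × Bool :=
  match st with
  | (seen, rotations, current, broke) =>
    if broke then (seen, rotations, current, broke)
    else
      let norm := pvSortL current
      if PySem.Set.contains seen norm then (seen, rotations, current, true)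
      else (PySem.Set.add seen norm, rotations ++ [current],
            current.map (fun p => (-p.2, p.1)), false)

def get_rotations (blocks : List (Int × Int)) : List (List (Int × Int)) :=
  ((PySem.List.pyRange 0 4 1).foldl pvRotStep (PySem.Set.empty, [], blocks, false)).2.1

-- ===== PORT B =====
-- the loop of _same_multiset: consume each q of ys out of rest; none = the early 'return False'
-- ('q in rest' = List.contains, 'rest.remove(q)' removes the first occurrence = List.erase: exact)
def pvConsume : List (Int × Int) → List (Int × Int) → Option (List (Int × Int))
  | rest, [] => some rest
  | rest, q :: qs => if rest.contains q then pvConsume (rest.erase q) qs else none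

def pvSameMultiset (xs ys : List (Int × Int)) : Bool :=
  match pvConsume xs ys with
  | some rest => rest.isEmpty
  | none => false

def get_rotations_alt (blocks : List (Int × Int)) : List (List (Int × Int)) :=
  let pts := blocks
  let period : Nat :=
    if !(pvSameMultiset pts (pts.map (fun p => (-p.1, -p.2)))) then 4
    else if pvSameMultiset pts (pts.map (fun p => (-p.2, p.1))) then 1
    else 2
  -- [...] [:period] with period ≥ 0 is List.take
  ([pts,
    pts.map (fun p => (-p.2, p.1)),
    pts.map (fun p => (-p.1, -p.2)),
    pts.map (fun p => (p.2, -p.1))]).take period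

-- ===== PRECONDITION & SPEC =====
def Spec_get_rotations (blocks : List (Int × Int)) (out : List (List (Int × Int))) : Prop := out = get_rotations_alt blocks
instance (blocks : List (Int × Int)) (out : List (List (Int × Int))) : Decidable (Spec_get_rotations blocks out) := by unfold Spec_get_rotations; infer_instance

-- ===== CLAIM (what is proved, stated in full; the proofs are below) =====
def Claim_equal_get_rotations : Prop := ∀ (blocks : List (Int × Int)), Dom_get_rotations blocks → Spec_get_rotations blocks (get_rotations blocks)

-- ===== LEMMAS AND PROOFS =====

theorem pvSameMultiset_eq_isPerm (xs ys : List (Int × Int)) :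
    pvSameMultiset xs ys = ys.isPerm xs := by
  induction ys generalizing xs with
  | nil => simp [pvSameMultiset, pvConsume, List.isPerm]
  | cons q qs ih =>
    by_cases h : q ∈ xs
    · have hc : xs.contains q = true := by simpa using h
      simp only [pvSameMultiset, pvConsume, List.isPerm, hc, if_true, Bool.true_and]
      exact ih (xs.erase q)
    · simp [pvSameMultiset, pvConsume, List.isPerm, h]

theorem pvSameMultiset_iff_perm (xs ys : List (Int × Int)) :
    pvSameMultiset xs ys = true ↔ ys.Perm xs := by
  rw [pvSameMultiset_eq_isPerm]; exact List.isPerm_iff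

theorem pvSortL_eq_iff_perm (l1 l2 : List (Int × Int)) : pvSortL l1 = pvSortL l2 ↔ l1.Perm l2 := by
  constructor
  · intro h
    have p1 : (pvSortL l1).Perm l1 := PySem.List.sorted_perm l1 _ _
    have p2 : (pvSortL l2).Perm l2 := PySem.List.sorted_perm l2 _ _
    rw [h] at p1
    exact p1.symm.trans p2
  · intro h
    exact PySem.List.sorted_eq_sorted_of_perm _ _ _ (fun a b hab => hab) h

theorem pvMap_rot_cancel (l : List (Int × Int)) :
    (l.map (fun p => (-p.2, p.1))).map (fun p : Int × Int => (p.2, -p.1)) = l := by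
  rw [List.map_map]
  have h : ((fun p : Int × Int => (p.2, -p.1)) ∘ (fun p : Int × Int => (-p.2, p.1))) = id := by
    funext p; simp
  rw [h, List.map_id]

theorem pvPerm_cancel_rot (l1 l2 : List (Int × Int))
    (h : (l1.map (fun p => (-p.2, p.1))).Perm (l2.map (fun p => (-p.2, p.1)))) : l1.Perm l2 := by
  have h2 := h.map (fun p : Int × Int => (p.2, -p.1))
  rwa [pvMap_rot_cancel, pvMap_rot_cancel] at h2

theorem pvMap_rot_rot (l : List (Int × Int)) :
    (l.map (fun p => (-p.2, p.1))).map (fun p : Int × Int => (-p.2, p.1))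
      = l.map (fun p => (-p.1, -p.2)) := by
  rw [List.map_map]; rfl

theorem pvMap_rot_rot2 (l : List (Int × Int)) :
    (l.map (fun p => (-p.1, -p.2))).map (fun p : Int × Int => (-p.2, p.1))
      = l.map (fun p => (p.2, -p.1)) := by
  rw [List.map_map]
  apply List.map_congr_left; intro p _
  simp

theorem pvMap_rot_rot3 (l : List (Int × Int)) :
    (l.map (fun p => (p.2, -p.1))).map (fun p : Int × Int => (-p.2, p.1)) = l := by
  rw [List.map_map]
  have h : ((fun p : Int × Int => (-p.2, p.1)) ∘ (fun p : Int × Int => (p.2, -p.1))) = id := by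
    funext p; simp
  rw [h, List.map_id]

-- ===== VERDICT (by name: the statement is the Claim_ definition above) =====
theorem get_rotations_spec : Claim_equal_get_rotations := by
  intro blocks _
  unfold Spec_get_rotations get_rotations get_rotations_alt
  rw [show PySem.List.pyRange 0 4 1 = [0, 1, 2, 3] from by decide]
  simp only [List.foldl_cons, List.foldl_nil]
  have e0 : pvRotStep (PySem.Set.empty, [], blocks, false) 0
      = ([pvSortL blocks], [blocks], blocks.map (fun p => (-p.2, p.1)), false) := by
    simp [pvRotStep, PySem.Set.empty, PySem.Set.contains, PySem.Set.add]
  rw [e0]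
  by_cases h1 : pvSortL (blocks.map (fun p : Int × Int => (-p.2, p.1))) = pvSortL blocks
  · -- 90-degree symmetric: A breaks at the 2nd iteration; B's period is 1
    have p90 : (blocks.map (fun p : Int × Int => (-p.2, p.1))).Perm blocks :=
      (pvSortL_eq_iff_perm _ _).mp h1
    have p180 : (blocks.map (fun p : Int × Int => (-p.1, -p.2))).Perm blocks := by
      have := p90.map (fun p : Int × Int => (-p.2, p.1))
      rw [pvMap_rot_rot] at this
      exact this.trans p90
    have e1 : pvRotStep ([pvSortL blocks], [blocks], blocks.map (fun p => (-p.2, p.1)), false) 1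
        = ([pvSortL blocks], [blocks], blocks.map (fun p => (-p.2, p.1)), true) := by
      simp [pvRotStep, PySem.Set.contains, h1]
    have eb : ∀ (seen : PySem.Set (List (Int × Int))) rots cur (n : Int),
        pvRotStep (seen, rots, cur, true) n = (seen, rots, cur, true) := by
      intro seen rots cur n; simp [pvRotStep]
    rw [e1, eb, eb]
    rw [(pvSameMultiset_iff_perm _ _).mpr p180, (pvSameMultiset_iff_perm _ _).mpr p90]
    simp
  · have p90n : ¬ (blocks.map (fun p : Int × Int => (-p.2, p.1))).Perm blocks :=
      fun h => h1 ((pvSortL_eq_iff_perm _ _).mpr h)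
    have e1 : pvRotStep ([pvSortL blocks], [blocks], blocks.map (fun p => (-p.2, p.1)), false) 1
        = ([pvSortL blocks, pvSortL (blocks.map (fun p => (-p.2, p.1)))],
           [blocks, blocks.map (fun p => (-p.2, p.1))],
           blocks.map (fun p => (-p.1, -p.2)), false) := by
      simp only [pvRotStep, PySem.Set.contains, PySem.Set.add, pvMap_rot_rot]
      simp [h1]
    rw [e1]
    by_cases h2 : pvSortL (blocks.map (fun p : Int × Int => (-p.1, -p.2))) = pvSortL blocks
    · -- 180- but not 90-symmetric: A breaks at the 3rd iteration; B's period is 2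
      have p180 : (blocks.map (fun p : Int × Int => (-p.1, -p.2))).Perm blocks :=
        (pvSortL_eq_iff_perm _ _).mp h2
      have e2 : pvRotStep ([pvSortL blocks, pvSortL (blocks.map (fun p => (-p.2, p.1)))],
            [blocks, blocks.map (fun p => (-p.2, p.1))],
            blocks.map (fun p => (-p.1, -p.2)), false) 2
          = ([pvSortL blocks, pvSortL (blocks.map (fun p => (-p.2, p.1)))],
             [blocks, blocks.map (fun p => (-p.2, p.1))],
             blocks.map (fun p => (-p.1, -p.2)), true) := by
        simp [pvRotStep, PySem.Set.contains, h2]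
      have eb : ∀ (seen : PySem.Set (List (Int × Int))) rots cur (n : Int),
          pvRotStep (seen, rots, cur, true) n = (seen, rots, cur, true) := by
        intro seen rots cur n; simp [pvRotStep]
      rw [e2, eb]
      rw [(pvSameMultiset_iff_perm _ _).mpr p180]
      have s90 : pvSameMultiset blocks (blocks.map (fun p : Int × Int => (-p.2, p.1))) = false := by
        cases hs : pvSameMultiset blocks (blocks.map (fun p : Int × Int => (-p.2, p.1))) with
        | false => rfl
        | true => exact absurd ((pvSameMultiset_iff_perm _ _).mp hs) p90n
      rw [s90]
      simp
    · -- no symmetry: A keeps all four states; B's period is 4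
      have p180n : ¬ (blocks.map (fun p : Int × Int => (-p.1, -p.2))).Perm blocks :=
        fun h => h2 ((pvSortL_eq_iff_perm _ _).mpr h)
      have h21 : pvSortL (blocks.map (fun p : Int × Int => (-p.1, -p.2)))
          ≠ pvSortL (blocks.map (fun p : Int × Int => (-p.2, p.1))) := by
        intro h
        apply h1
        apply (pvSortL_eq_iff_perm _ _).mpr
        apply pvPerm_cancel_rot
        rw [pvMap_rot_rot]
        exact (pvSortL_eq_iff_perm _ _).mp h
      have e2 : pvRotStep ([pvSortL blocks, pvSortL (blocks.map (fun p => (-p.2, p.1)))],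
            [blocks, blocks.map (fun p => (-p.2, p.1))],
            blocks.map (fun p => (-p.1, -p.2)), false) 2
          = ([pvSortL blocks, pvSortL (blocks.map (fun p => (-p.2, p.1))),
              pvSortL (blocks.map (fun p => (-p.1, -p.2)))],
             [blocks, blocks.map (fun p => (-p.2, p.1)), blocks.map (fun p => (-p.1, -p.2))],
             blocks.map (fun p => (p.2, -p.1)), false) := by
        simp only [pvRotStep, PySem.Set.contains, PySem.Set.add, pvMap_rot_rot2]
        simp [h2, h21]
      rw [e2]
      have h30 : pvSortL (blocks.map (fun p : Int × Int => (p.2, -p.1))) ≠ pvSortL blocks := by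
        intro h
        apply h1
        apply (pvSortL_eq_iff_perm _ _).mpr
        have hp : (blocks.map (fun p : Int × Int => (p.2, -p.1))).Perm blocks :=
          (pvSortL_eq_iff_perm _ _).mp h
        have hm := hp.map (fun p : Int × Int => (-p.2, p.1))
        rw [pvMap_rot_rot3] at hm
        exact hm.symm
      have h31 : pvSortL (blocks.map (fun p : Int × Int => (p.2, -p.1)))
          ≠ pvSortL (blocks.map (fun p : Int × Int => (-p.2, p.1))) := by
        intro h
        apply h2
        apply (pvSortL_eq_iff_perm _ _).mpr
        have hp : (blocks.map (fun p : Int × Int => (p.2, -p.1))).Perm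
            (blocks.map (fun p : Int × Int => (-p.2, p.1))) := (pvSortL_eq_iff_perm _ _).mp h
        rw [← pvMap_rot_rot2] at hp
        exact pvPerm_cancel_rot _ _ hp
      have h32 : pvSortL (blocks.map (fun p : Int × Int => (p.2, -p.1)))
          ≠ pvSortL (blocks.map (fun p : Int × Int => (-p.1, -p.2))) := by
        intro h
        apply h21
        apply (pvSortL_eq_iff_perm _ _).mpr
        rw [← pvMap_rot_rot]
        have hp : (blocks.map (fun p : Int × Int => (p.2, -p.1))).Perm
            (blocks.map (fun p : Int × Int => (-p.1, -p.2))) := (pvSortL_eq_iff_perm _ _).mp h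
        rw [← pvMap_rot_rot2, ← pvMap_rot_rot] at hp
        exact pvPerm_cancel_rot _ _ hp
      have e3 : pvRotStep ([pvSortL blocks, pvSortL (blocks.map (fun p => (-p.2, p.1))),
              pvSortL (blocks.map (fun p => (-p.1, -p.2)))],
             [blocks, blocks.map (fun p => (-p.2, p.1)), blocks.map (fun p => (-p.1, -p.2))],
             blocks.map (fun p => (p.2, -p.1)), false) 3
          = ([pvSortL blocks, pvSortL (blocks.map (fun p => (-p.2, p.1))),
              pvSortL (blocks.map (fun p => (-p.1, -p.2))),
              pvSortL (blocks.map (fun p => (p.2, -p.1)))],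
             [blocks, blocks.map (fun p => (-p.2, p.1)), blocks.map (fun p => (-p.1, -p.2)),
              blocks.map (fun p => (p.2, -p.1))],
             blocks, false) := by
        simp only [pvRotStep, PySem.Set.contains, PySem.Set.add, pvMap_rot_rot3]
        simp [h30, h31, h32]
      rw [e3]
      have s180 : pvSameMultiset blocks (blocks.map (fun p : Int × Int => (-p.1, -p.2))) = false := by
        cases hs : pvSameMultiset blocks (blocks.map (fun p : Int × Int => (-p.1, -p.2))) with
        | false => rfl
        | true => exact absurd ((pvSameMultiset_iff_perm _ _).mp hs) p180n
      rw [s180]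
      simp
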